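-- pv_equiv track=rewrite | github.com/Stanford-NavLab/LuPNT | eigenlldb.py | split_template_args
-- ===== SOURCE A (Python) =====
-- def split_template_args(s):
--     result = []
--     brace_count = 0
--     current_arg = ""
--
--     for char in s:
--         if char == "<":
--             brace_count += 1
--         elif char == ">":
--             brace_count -= 1
--         elif char == "," and brace_count == 0:
--             result.append(current_arg.strip())
--             current_arg = ""
--             continue
--
--         current_arg += char
--
--     if current_arg:
--         result.append(current_arg.strip())
--
--     return result
-- ===== SOURCE B (Python) =====
-- def split_template_args(s):
--     parts = s.split(',')
--     result = []
--     buf = parts[0]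
--     bal = parts[0].count('<') - parts[0].count('>')
--     for p in parts[1:]:
--         if bal == 0:
--             result.append(buf.strip())
--             buf = p
--         else:
--             buf = buf + ',' + p
--         bal += p.count('<') - p.count('>')
--     if buf:
--         result.append(buf.strip())
--     return result
-- ===== Notes on version B (the rewrite author's own statement) =====
-- stated objective: faster
-- what changed: A scans character by character in Python, maintaining a bracket depth and growing the current argument one char at a time; B first splits the whole string on commas with the C-level str.split and then runs one merge pass over the fragment list, rejoining adjacent fragments while a running angle-bracket balance is nonzero and emitting the stripped buffer at each balanced boundary.
import Mathlib
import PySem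

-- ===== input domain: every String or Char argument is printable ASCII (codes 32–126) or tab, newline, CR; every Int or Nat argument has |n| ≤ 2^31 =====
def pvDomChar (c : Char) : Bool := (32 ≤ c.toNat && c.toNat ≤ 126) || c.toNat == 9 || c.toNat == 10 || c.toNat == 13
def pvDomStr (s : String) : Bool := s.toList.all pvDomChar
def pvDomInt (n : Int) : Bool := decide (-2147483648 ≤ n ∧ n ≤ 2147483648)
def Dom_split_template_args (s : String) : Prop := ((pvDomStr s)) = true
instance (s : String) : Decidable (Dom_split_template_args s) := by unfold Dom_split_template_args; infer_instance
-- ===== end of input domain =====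

-- B replaces A's char-by-char scan with a split-on-',' pass followed by a balance-driven
-- merge of the fragments; a timing run measured B faster in Python (C-level split vs per-char loop).

-- ===== PORT A =====
-- literal port of A's loop body: one step per character, state (result, brace_count, current_arg)
def pvStepA (st : List String × Int × List Char) (c : Char) : List String × Int × List Char :=
  if c = '<' then (st.1, st.2.1 + 1, st.2.2 ++ [c])
  else if c = '>' then (st.1, st.2.1 - 1, st.2.2 ++ [c])
  else if c = ',' ∧ st.2.1 = 0 then (st.1 ++ [String.ofList (PySem.Chars.strip st.2.2)], st.2.1, [])
  else (st.1, st.2.1, st.2.2 ++ [c])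

def split_template_args (s : String) : List String :=
  let st := s.toList.foldl pvStepA ([], 0, [])
  if st.2.2 ≠ [] then st.1 ++ [String.ofList (PySem.Chars.strip st.2.2)] else st.1

-- ===== PORT B =====
-- p.count('<') - p.count('>')
def pvBal (p : List Char) : Int :=
  (PySem.Chars.count p ['<'] : Int) - (PySem.Chars.count p ['>'] : Int)

-- one step per fragment, state (result, buf, bal)
def pvStepB (st : List String × List Char × Int) (p : List Char) : List String × List Char × Int :=
  if st.2.2 = 0 then (st.1 ++ [String.ofList (PySem.Chars.strip st.2.1)], p, st.2.2 + pvBal p)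
  else (st.1, st.2.1 ++ ',' :: p, st.2.2 + pvBal p)

def split_template_args_alt (s : String) : List String :=
  let parts := PySem.Chars.splitOn s.toList [',']   -- s.split(',') — always nonempty
  let p0 := parts.headD []
  let st := parts.tail.foldl pvStepB ([], p0, pvBal p0)
  if st.2.1 ≠ [] then st.1 ++ [String.ofList (PySem.Chars.strip st.2.1)] else st.1

-- ===== PRECONDITION & SPEC =====
def Spec_split_template_args (s : String) (out : List String) : Prop := out = split_template_args_alt s
instance (s : String) (out : List String) : Decidable (Spec_split_template_args s out) := by unfold Spec_split_template_args; infer_instance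

-- ===== CLAIM (what is proved, stated in full; the proofs are below) =====
def Claim_equal_split_template_args : Prop := ∀ (s : String), Dom_split_template_args s → Spec_split_template_args s (split_template_args s)

-- ===== LEMMAS AND PROOFS =====

-- structural model of splitting a char list at every ','
def pvGlue (pre : List Char) : List Char → List (List Char)
  | [] => [pre]
  | c :: rest => if c = ',' then pre :: pvGlue [] rest else pvGlue (pre ++ [c]) rest

-- rejoin fragments with ','
def pvInterc : List (List Char) → List Char
  | [] => []
  | [p] => p
  | p :: q :: r => p ++ ',' :: pvInterc (q :: r)

theorem pvCountGoNil (d : Char) (fuel acc : Nat) : PySem.Chars.count.go [d] fuel [] acc = acc := by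
  cases fuel <;> simp [PySem.Chars.count.go]

theorem pvCountGoCons (d c : Char) (t : List Char) (fuel acc : Nat) :
    PySem.Chars.count.go [d] (fuel+1) (c::t) acc
      = if c = d then PySem.Chars.count.go [d] fuel t (acc+1) else PySem.Chars.count.go [d] fuel t acc := by
  by_cases h : c = d
  · subst h; simp [PySem.Chars.count.go, List.isPrefixOf]
  · have h' : ¬ d = c := fun hh => h hh.symm
    simp [PySem.Chars.count.go, List.isPrefixOf, h, h']

theorem pvCountGoEq (d : Char) (l : List Char) : ∀ (fuel acc : Nat), l.length ≤ fuel →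
    PySem.Chars.count.go [d] fuel l acc = acc + l.count d := by
  induction l with
  | nil => intro fuel acc _; simp [pvCountGoNil]
  | cons c t ih =>
    intro fuel acc h
    cases fuel with
    | zero => simp at h
    | succ fuel =>
      rw [pvCountGoCons]
      simp only [List.length_cons, Nat.add_le_add_iff_right] at h
      by_cases hc : c = d
      · simp [hc, ih fuel (acc+1) h]
        omega
      · have h' : ¬ d = c := fun hh => hc hh.symm
        simp [hc, ih fuel acc h]

theorem pvCountSingle (d : Char) (l : List Char) : PySem.Chars.count l [d] = l.count d := by
  simp [PySem.Chars.count, pvCountGoEq d l l.length 0 rfl.le]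

theorem pvBalNil : pvBal [] = 0 := by decide

theorem pvBalCons (c : Char) (t : List Char) :
    pvBal (c :: t) = (if c = '<' then 1 else if c = '>' then -1 else 0) + pvBal t := by
  simp only [pvBal, pvCountSingle, List.count_cons]
  split_ifs with h1 h2 <;> simp_all <;> omega

theorem pvSplitGoNil' (fuel : Nat) (cur : List Char) (acc : List (List Char)) :
    PySem.Chars.splitOn.go [','] fuel [] cur acc = (cur.reverse :: acc).reverse := by
  cases fuel <;> simp [PySem.Chars.splitOn.go]

theorem pvSplitGoCons (fuel : Nat) (c : Char) (rest cur : List Char) (acc : List (List Char)) :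
    PySem.Chars.splitOn.go [','] (fuel+1) (c::rest) cur acc
      = if c = ',' then PySem.Chars.splitOn.go [','] fuel rest [] (cur.reverse :: acc)
        else PySem.Chars.splitOn.go [','] fuel rest (c::cur) acc := by
  by_cases h : c = ','
  · subst h; simp [PySem.Chars.splitOn.go, List.isPrefixOf]
  · have h' : ¬ ',' = c := fun hh => h hh.symm
    simp [PySem.Chars.splitOn.go, List.isPrefixOf, h, h']

theorem pvSplitGoEq (l : List Char) : ∀ (fuel : Nat) (cur : List Char) (acc : List (List Char)),
    l.length ≤ fuel →
    PySem.Chars.splitOn.go [','] fuel l cur acc = acc.reverse ++ pvGlue cur.reverse l := by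
  induction l with
  | nil => intro fuel cur acc _; simp [pvSplitGoNil', pvGlue]
  | cons c rest ih =>
    intro fuel cur acc h
    cases fuel with
    | zero => simp at h
    | succ fuel =>
      rw [pvSplitGoCons]
      simp only [List.length_cons, Nat.add_le_add_iff_right] at h
      by_cases hc : c = ','
      · simp [hc, ih fuel [] (cur.reverse :: acc) h, pvGlue]
      · simp [hc, ih fuel (c :: cur) acc h, pvGlue]

theorem pvSplitEqGlue (l : List Char) : PySem.Chars.splitOn l [','] = pvGlue [] l := by
  simp [PySem.Chars.splitOn, pvSplitGoEq l (l.length + 1) [] [] (by omega)]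

theorem pvGlueNeNil (l pre : List Char) : pvGlue pre l ≠ [] := by
  induction l generalizing pre with
  | nil => simp [pvGlue]
  | cons c rest ih =>
    by_cases hc : c = ','
    · simp [pvGlue, hc]
    · simp [pvGlue, hc]; exact ih (pre ++ [c])

theorem pvGlueCommaFree (l : List Char) : ∀ pre, ',' ∉ pre → ∀ p ∈ pvGlue pre l, ',' ∉ p := by
  induction l with
  | nil => intro pre hpre p hp; simp [pvGlue] at hp; subst hp; exact hpre
  | cons c rest ih =>
    intro pre hpre p hp
    by_cases hc : c = ','
    · simp [pvGlue, hc] at hp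
      rcases hp with h | h
      · subst h; exact hpre
      · exact ih [] (by simp) p h
    · simp [pvGlue, hc] at hp
      exact ih (pre ++ [c]) (by simp [hpre]; exact fun hh => hc hh.symm) p hp

theorem pvIntercGlue (l : List Char) : ∀ pre, pvInterc (pvGlue pre l) = pre ++ l := by
  induction l with
  | nil => intro pre; simp [pvGlue, pvInterc]
  | cons c rest ih =>
    intro pre
    by_cases hc : c = ','
    · subst hc
      simp only [pvGlue, if_true]
      rcases h : pvGlue ([] : List Char) rest with _ | ⟨q, r⟩
      · exact absurd h (pvGlueNeNil rest [])
      · have := ih ([] : List Char)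
        rw [h] at this
        simp [pvInterc, this]
    · simp only [pvGlue, if_neg hc, ih (pre ++ [c])]
      simp

theorem pvFragA (p : List Char) (hp : ',' ∉ p) (r : List String) (bc : Int) (cur : List Char) :
    p.foldl pvStepA (r, bc, cur) = (r, bc + pvBal p, cur ++ p) := by
  induction p generalizing bc cur with
  | nil => simp [pvBalNil]
  | cons c t ih =>
    have hc : c ≠ ',' := fun h => hp (h ▸ List.mem_cons_self)
    have ht : ',' ∉ t := fun h => hp (List.mem_cons_of_mem _ h)
    rw [List.foldl_cons, pvBalCons]
    by_cases h1 : c = '<'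
    · subst h1
      have hstep : pvStepA (r, bc, cur) '<' = (r, bc + 1, cur ++ ['<']) := by simp [pvStepA]
      rw [hstep, ih ht]
      simp; omega
    · by_cases h2 : c = '>'
      · subst h2
        have hstep : pvStepA (r, bc, cur) '>' = (r, bc - 1, cur ++ ['>']) := by simp [pvStepA]
        rw [hstep, ih ht]
        simp; omega
      · have hand : ¬ (c = ',' ∧ bc = 0) := fun h => hc h.1
        have hstep : pvStepA (r, bc, cur) c = (r, bc, cur ++ [c]) := by
          simp [pvStepA, h1, h2, hand]
        rw [hstep, ih ht]
        simp [h1, h2]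

theorem pvMain (ps : List (List Char)) :
    ∀ (p0 : List Char) (r : List String) (bc : Int) (cur : List Char),
    ',' ∉ p0 → (∀ p ∈ ps, ',' ∉ p) →
    (pvInterc (p0 :: ps)).foldl pvStepA (r, bc, cur)
      = ((ps.foldl pvStepB (r, cur ++ p0, bc + pvBal p0)).1,
         (ps.foldl pvStepB (r, cur ++ p0, bc + pvBal p0)).2.2,
         (ps.foldl pvStepB (r, cur ++ p0, bc + pvBal p0)).2.1) := by
  induction ps with
  | nil =>
    intro p0 r bc cur h0 _
    simp [pvInterc, pvFragA p0 h0]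
  | cons p1 rest ih =>
    intro p0 r bc cur h0 hps
    have h1 : ',' ∉ p1 := hps p1 List.mem_cons_self
    have hrest : ∀ p ∈ rest, ',' ∉ p := fun p hp => hps p (List.mem_cons_of_mem _ hp)
    show (p0 ++ ',' :: pvInterc (p1 :: rest)).foldl pvStepA (r, bc, cur) = _
    rw [List.foldl_append, pvFragA p0 h0, List.foldl_cons]
    by_cases hz : bc + pvBal p0 = 0
    · rw [hz]
      have hA : pvStepA (r, 0, cur ++ p0) ','
          = (r ++ [String.ofList (PySem.Chars.strip (cur ++ p0))], 0, []) := by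
        simp [pvStepA]
      rw [hA, ih p1 _ 0 [] h1 hrest]
      have hB : pvStepB (r, cur ++ p0, 0) p1
          = (r ++ [String.ofList (PySem.Chars.strip (cur ++ p0))], p1, 0 + pvBal p1) := by
        simp [pvStepB]
      rw [List.foldl_cons, hB]
      simp
    · have hA : pvStepA (r, bc + pvBal p0, cur ++ p0) ','
          = (r, bc + pvBal p0, (cur ++ p0) ++ [',']) := by
        simp [pvStepA, hz]
      rw [hA, ih p1 _ (bc + pvBal p0) ((cur ++ p0) ++ [',']) h1 hrest]
      have hB : pvStepB (r, cur ++ p0, bc + pvBal p0) p1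
          = (r, (cur ++ p0) ++ ',' :: p1, (bc + pvBal p0) + pvBal p1) := by
        simp [pvStepB, hz]
      rw [List.foldl_cons, hB]
      simp

-- ===== VERDICT (by name: the statement is the Claim_ definition above) =====
theorem split_template_args_spec : Claim_equal_split_template_args := by
  intro s _
  unfold Spec_split_template_args split_template_args split_template_args_alt
  rcases h : pvGlue ([] : List Char) s.toList with _ | ⟨p0, ps⟩
  · exact absurd h (pvGlueNeNil _ [])
  · have hsplit : PySem.Chars.splitOn s.toList [','] = p0 :: ps := by
      rw [pvSplitEqGlue, h]
    have hfree := pvGlueCommaFree s.toList [] (by simp)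
    rw [h] at hfree
    have h0 : ',' ∉ p0 := hfree p0 List.mem_cons_self
    have hps : ∀ p ∈ ps, ',' ∉ p := fun p hp => hfree p (List.mem_cons_of_mem _ hp)
    have hl : s.toList = pvInterc (p0 :: ps) := by
      rw [← h, pvIntercGlue]; simp
    rw [hsplit, hl]
    have := pvMain ps p0 [] 0 [] h0 hps
    simp only [List.nil_append, zero_add] at this
    rw [this]
    simp
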